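-- pv_equiv track=rewrite | github.com/jcolinpatrick/kryptos | scripts/e_s_59_width7_nonperiodic.py | keyword_to_order
-- ===== SOURCE A (Python) =====
-- def keyword_to_order(keyword):
--     indexed = sorted(range(len(keyword)), key=lambda i: (keyword[i], i))
--     order = [0] * len(keyword)
--     for col, rank in enumerate(indexed):
--         order[col] = rank
--     read_order = [0] * len(keyword)
--     for col, rank in enumerate(order):
--         read_order[rank] = col
--     return read_order
-- ===== SOURCE B (Python) =====
-- def keyword_to_order(keyword):
--     first = sorted(range(len(keyword)), key=lambda i: (keyword[i], i))
--     return sorted(range(len(keyword)), key=first.__getitem__)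
-- ===== Notes on version B (the rewrite author's own statement) =====
-- stated objective: simpler
-- what changed: The explicit copy loop and index-assignment inversion loop are replaced by a second argsort: since the first argsort is a strict permutation (ties broken by index), sorting indices by their first-argsort value yields exactly the inverse permutation.
import Mathlib
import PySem

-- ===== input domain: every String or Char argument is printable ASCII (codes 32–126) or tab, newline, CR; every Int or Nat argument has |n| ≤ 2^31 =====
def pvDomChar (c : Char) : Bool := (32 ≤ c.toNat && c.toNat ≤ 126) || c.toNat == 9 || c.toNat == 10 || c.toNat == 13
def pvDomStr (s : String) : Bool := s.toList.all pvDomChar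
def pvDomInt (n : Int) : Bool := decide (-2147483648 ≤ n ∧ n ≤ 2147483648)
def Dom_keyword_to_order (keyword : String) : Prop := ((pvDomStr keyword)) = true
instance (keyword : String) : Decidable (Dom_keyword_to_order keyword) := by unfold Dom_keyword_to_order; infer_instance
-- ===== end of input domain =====

-- B replaces A's copy loop and index-assignment inversion loop by a second argsort
-- (sorting indices by their rank in the first argsort), which yields the same inverse
-- permutation; objective: simpler (same asymptotic cost).


-- ===== PORT A =====
-- indexed = sorted(range(len(keyword)), key=lambda i: (keyword[i], i));
-- then the order[col] = rank copy loop, then the read_order[rank] = col inversion loop.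
-- keyword[i] and the written slots are in range on every reached index, so pyGetD/pySetD are exact here.
def keyword_to_order (keyword : String) : List Int :=
  let n : Int := PySem.Str.len keyword
  let indexed := PySem.List.sorted2 (PySem.List.pyRange 0 n 1)
      (fun i => PySem.List.pyGetD keyword.toList i ' ') (fun i => i)
  let order := (PySem.List.enumerate indexed).foldl
      (fun acc p => PySem.List.pySetD acc p.1 p.2) (List.replicate n.toNat 0)
  (PySem.List.enumerate order).foldl
      (fun acc p => PySem.List.pySetD acc p.2 p.1) (List.replicate n.toNat 0)

-- ===== PORT B =====
-- first = sorted(range(len(keyword)), key=lambda i: (keyword[i], i));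
-- return sorted(range(len(keyword)), key=first.__getitem__)   (first[i] is in range for every i drawn).
def keyword_to_order_alt (keyword : String) : List Int :=
  let n : Int := PySem.Str.len keyword
  let first := PySem.List.sorted2 (PySem.List.pyRange 0 n 1)
      (fun i => PySem.List.pyGetD keyword.toList i ' ') (fun i => i)
  PySem.List.sorted (PySem.List.pyRange 0 n 1) (fun i => PySem.List.pyGetD first i 0)

-- ===== PRECONDITION & SPEC =====
def Spec_keyword_to_order (keyword : String) (out : List Int) : Prop := out = keyword_to_order_alt keyword
instance (keyword : String) (out : List Int) : Decidable (Spec_keyword_to_order keyword out) := by unfold Spec_keyword_to_order; infer_instance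

-- ===== CLAIM (what is proved, stated in full; the proofs are below) =====
def Claim_equal_keyword_to_order : Prop := ∀ (keyword : String), Dom_keyword_to_order keyword → Spec_keyword_to_order keyword (keyword_to_order keyword)

-- ===== LEMMAS AND PROOFS =====

-- A's first loop writes xs[t] into slot s+t of the accumulator: it reproduces xs after a prefix.
theorem pv_copy_fold {xs acc : List Int} {s : Nat} (h : acc.length = s + xs.length) :
    (PySem.List.enumerate xs (s : Int)).foldl
      (fun a p => PySem.List.pySetD a p.1 p.2) acc = acc.take s ++ xs := by
  induction xs generalizing acc s with
  | nil =>
      have ht : acc.take s = acc := List.take_of_length_le (by simp at h; omega)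
      simp [PySem.List.enumerate, ht]
  | cons x t ih =>
      rw [PySem.List.enumerate_cons, List.foldl_cons]
      have hs : s < acc.length := by simp at h; omega
      have h1 : PySem.List.pySetD acc (s : Int) x = acc.set s x :=
        PySem.List.pySetD_natCast acc s x
      have h2 : ((s : Int) + 1) = ((s + 1 : Nat) : Int) := by push_cast; ring
      rw [h1, h2, ih (by simp; simp at h; omega)]
      have hset : acc.set s x = acc.take s ++ x :: acc.drop (s + 1) := by
        rw [List.set_eq_take_append_cons_drop, if_pos hs]
      rw [hset, List.take_append]
      simp [List.length_take, Nat.min_eq_left (le_of_lt hs), List.take_succ_cons]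

-- A's second loop, generalized: after scattering col s+t into slot xs[t], slot j holds
-- s + idxOf j xs when j ∈ xs and is untouched otherwise; the length is preserved.
theorem pv_scatter_fold (xs : List Int) (acc : List Int) (s : Int)
    (hv : ∀ v ∈ xs, 0 ≤ v ∧ v.toNat < acc.length) (hnd : xs.Nodup) :
    ((PySem.List.enumerate xs s).foldl (fun a p => PySem.List.pySetD a p.2 p.1) acc).length = acc.length ∧
      ∀ j : Nat, j < acc.length →
        ((PySem.List.enumerate xs s).foldl (fun a p => PySem.List.pySetD a p.2 p.1) acc)[j]? =
          if (j : Int) ∈ xs then some (s + (xs.idxOf (j : Int) : Int)) else acc[j]? := by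
  induction xs generalizing acc s with
  | nil => simp [PySem.List.enumerate]
  | cons v t ih =>
      rw [PySem.List.enumerate_cons, List.foldl_cons]
      obtain ⟨hv0, hvlen⟩ := hv v (List.mem_cons_self)
      have hset : PySem.List.pySetD acc v s = acc.set v.toNat s :=
        PySem.List.pySetD_of_nonneg acc s hv0
      rw [hset]
      have hlen' : (acc.set v.toNat s).length = acc.length := by simp
      obtain ⟨ihlen, ihget⟩ := ih (acc.set v.toNat s) (s + 1)
        (fun w hw => by rw [hlen']; exact hv w (List.mem_cons_of_mem _ hw)) hnd.of_cons
      refine ⟨by rw [ihlen, hlen'], ?_⟩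
      intro j hj
      rw [ihget j (by rw [hlen']; exact hj)]
      by_cases hjv : (j : Int) = v
      · have hjt : (j : Int) ∉ t := by rw [hjv]; exact (List.nodup_cons.mp hnd).1
        rw [if_neg hjt, if_pos (by rw [hjv]; exact List.mem_cons_self)]
        have hvj : v.toNat = j := by omega
        rw [hvj, List.getElem?_set_self (hvj ▸ hvlen)]
        rw [hjv, List.idxOf_cons_self]
        simp
      · have hne : v.toNat ≠ j := by omega
        rw [List.getElem?_set_ne hne]
        have hidx : ((j : Int) ∈ t) → (v :: t).idxOf (j : Int) = t.idxOf (j : Int) + 1 := by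
          intro _
          rw [List.idxOf_cons]
          simp [show (v == (j : Int)) = false by simpa using fun h => hjv (by omega)]
        by_cases hjt : (j : Int) ∈ t
        · rw [if_pos hjt, if_pos (List.mem_cons_of_mem _ hjt), hidx hjt]
          push_cast; ring_nf
        · rw [if_neg hjt, if_neg (by simp [hjv, hjt])]

-- A's copy loop rebuilds `first`; its scatter loop builds the inverse permutation, which is
-- exactly the strictly key-increasing rearrangement that B's second sort is proved to return.
theorem pv_keyword_main (keyword : String) :
    keyword_to_order keyword = keyword_to_order_alt keyword := by
  unfold keyword_to_order keyword_to_order_alt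
  simp only [PySem.Str.len_eq, Int.toNat_natCast]
  set m := keyword.toList.length with hm
  set first := PySem.List.sorted2 (PySem.List.pyRange 0 (m : Int) 1)
      (fun i => PySem.List.pyGetD keyword.toList i ' ') (fun i => i) with hfirst
  have hperm1 : first.Perm (PySem.List.pyRange 0 (m : Int) 1) :=
    PySem.List.sorted2_perm _ _ _ _
  have hfl : first.length = m := by
    rw [hperm1.length_eq, PySem.List.length_pyRange_one]; omega
  have hfmem : ∀ x : Int, x ∈ first ↔ 0 ≤ x ∧ x < (m : Int) := by
    intro x; rw [hperm1.mem_iff, PySem.List.mem_pyRange_one]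
  have hfnd : first.Nodup := hperm1.nodup_iff.mpr (PySem.List.nodup_pyRange_one _ _)
  have hcopy : (PySem.List.enumerate first).foldl
      (fun acc p => PySem.List.pySetD acc p.1 p.2) (List.replicate m 0) = first := by
    have h0 : ((0 : Nat) : Int) = (0 : Int) := by norm_num
    have := pv_copy_fold (xs := first) (acc := List.replicate m (0:Int)) (s := 0)
      (by simp [hfl])
    rw [h0] at this
    simpa using this
  rw [hcopy]
  obtain ⟨hil, hig⟩ := pv_scatter_fold first (List.replicate m 0) 0
    (fun v hv => by
      have := (hfmem v).mp hv
      constructor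
      · omega
      · simp; omega) hfnd
  set inv := (PySem.List.enumerate first).foldl
      (fun a p => PySem.List.pySetD a p.2 p.1) (List.replicate m (0:Int)) with hinv
  have hil' : inv.length = m := by simpa using hil
  have hig' : ∀ j : Nat, j < m → inv[j]? = some ((first.idxOf (j : Int) : Int)) := by
    intro j hj
    have hjm : (j : Int) ∈ first := (hfmem _).mpr ⟨by omega, by omega⟩
    have := hig j (by simpa using hj)
    rw [if_pos hjm] at this
    simpa using this
  have higE : ∀ (j : Nat) (hj : j < m), inv[j]'(by omega) = ((first.idxOf (j : Int) : Int)) := by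
    intro j hj
    have h1 := hig' j hj
    rw [List.getElem?_eq_getElem (by omega)] at h1
    exact Option.some.inj h1
  have hkey : ∀ (j : Nat), j < m →
      PySem.List.pyGetD first ((first.idxOf ((j : Nat) : Int) : Nat) : Int) 0 = (j : Int) := by
    intro j hj
    have hjm : (j : Int) ∈ first := (hfmem _).mpr ⟨by omega, by omega⟩
    have hlt : first.idxOf ((j:Nat) : Int) < first.length := List.idxOf_lt_length_of_mem hjm
    rw [PySem.List.pyGetD_natCast]
    rw [List.getD_eq_getElem _ _ hlt]
    exact List.getElem_idxOf hlt
  have hpair : inv.Pairwise (fun a b =>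
      PySem.List.pyGetD first a 0 < PySem.List.pyGetD first b 0) := by
    rw [List.pairwise_iff_getElem]
    intro p q hp hq hpq
    rw [higE p (by omega), higE q (by omega)]
    rw [hkey p (by omega), hkey q (by omega)]
    exact_mod_cast hpq
  have hndinv : inv.Nodup := hpair.imp (fun {a b} h => by
    intro heq; subst heq; exact lt_irrefl _ h)
  have hmeminv : ∀ x : Int, x ∈ inv ↔ x ∈ PySem.List.pyRange 0 (m:Int) 1 := by
    intro x
    rw [PySem.List.mem_pyRange_one]
    constructor
    · intro hx
      obtain ⟨p, hp⟩ := List.getElem?_of_mem hx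
      have hpm : p < m := by
        have : p < inv.length := by
          by_contra hc
          rw [List.getElem?_eq_none (by omega)] at hp; simp at hp
        omega
      rw [hig' p hpm] at hp
      have hx' : x = ((first.idxOf ((p:Nat) : Int) : Nat) : Int) := (Option.some.inj hp).symm
      have hpm' : ((p:Nat) : Int) ∈ first := (hfmem _).mpr ⟨by omega, by omega⟩
      have := List.idxOf_lt_length_of_mem hpm'
      rw [hx']
      constructor
      · positivity
      · omega
    · rintro ⟨hx0, hxm⟩
      set p := x.toNat with hp
      have hpm : p < m := by omega
      have hgm : first[p]'(by omega) ∈ first := List.getElem_mem _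
      have hgl := (hfmem _).mp hgm
      set j := (first[p]'(by omega)).toNat with hj
      have hjc : ((j : Nat) : Int) = first[p]'(by omega) := by omega
      have hjm : j < m := by omega
      have hidx : first.idxOf ((j:Nat) : Int) = p := by
        rw [hjc]
        exact hfnd.idxOf_getElem p (by omega)
      have := hig' j hjm
      rw [hidx] at this
      have : inv[j]? = some x := by rw [this]; congr 1; omega
      exact List.mem_of_getElem? this
  have hperm2 : inv.Perm (PySem.List.pyRange 0 (m:Int) 1) :=
    (List.perm_ext_iff_of_nodup hndinv (PySem.List.nodup_pyRange_one _ _)).mpr hmeminv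
  exact (PySem.List.sorted_eq_of_perm_of_pairwise_lt _ _ _ hperm2 hpair).symm

-- ===== VERDICT (by name: the statement is the Claim_ definition above) =====
theorem keyword_to_order_spec : Claim_equal_keyword_to_order := by
  intro keyword _
  unfold Spec_keyword_to_order
  exact pv_keyword_main keyword
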